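-- pv_equiv track=rewrite | github.com/james-stuff/AdventofCode | aoc_2022.py | day_10_value_after_cycle_completions
-- ===== SOURCE A (Python) =====
-- def day_10_value_after_cycle_completions(text: str) -> dict:
--     completed_instructions, register_value = 0, 1
--     status_by_cycle = {}
--     for command in text.split("\n"):
--         instruction, _, increment = command.partition(" ")
--         completed_instructions += 1
--         if instruction == "addx":
--             completed_instructions += 1
--             register_value += int(increment)
--         status_by_cycle[completed_instructions] = register_value
--     return status_by_cycle
-- ===== SOURCE B (Python) =====
-- def day_10_value_after_cycle_completions(text: str) -> dict:
--     pairs = [_parse(cmd) for cmd in text.split("\n")]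
--     cycles = _prefix_sums([c for c, _ in pairs], 0)
--     values = _prefix_sums([d for _, d in pairs], 1)
--     return dict(zip(cycles, values))
--
--
-- def _parse(cmd):
--     op, _, arg = cmd.partition(" ")
--     return (2, int(arg)) if op == "addx" else (1, 0)
--
--
-- def _prefix_sums(xs, start):
--     total, out = start, []
--     for x in xs:
--         total += x
--         out.append(total)
--     return out
-- ===== Notes on version B (the rewrite author's own statement) =====
-- stated objective: alternative
-- what changed: A's single loop threading two counters and an in-place dict is replaced by a parse pass mapping each command to a (cycle_cost, register_delta) pair, two independent prefix-sum passes (cycles seeded at 0, register values seeded at 1), and a dict built from zipping the two sums; Pre_ excludes only inputs where both raise ValueError (an 'addx' line with a non-integer argument).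
import Mathlib
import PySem

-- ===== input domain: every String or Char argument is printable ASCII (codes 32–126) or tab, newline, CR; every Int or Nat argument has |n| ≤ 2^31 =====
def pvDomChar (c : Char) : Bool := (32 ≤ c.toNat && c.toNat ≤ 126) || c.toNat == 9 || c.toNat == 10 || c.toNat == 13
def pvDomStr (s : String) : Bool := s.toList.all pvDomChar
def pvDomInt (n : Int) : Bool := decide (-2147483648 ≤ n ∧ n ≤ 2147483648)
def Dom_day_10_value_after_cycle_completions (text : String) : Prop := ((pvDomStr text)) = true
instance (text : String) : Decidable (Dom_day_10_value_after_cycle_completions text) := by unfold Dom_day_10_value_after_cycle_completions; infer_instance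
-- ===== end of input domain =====

-- B replaces A's single threaded loop (two counters + a dict mutated in place) by a parse pass into
-- (cycle_cost, delta) pairs, two independent prefix-sum passes, and a zip (objective: alternative decomposition).

-- shared helper: cmd.partition(" ") — (part before the first space, part after); exact: (s, "") when " " is absent
def pvPartSpace : List Char → List Char × List Char
  | [] => ([], [])
  | c :: cs =>
    if c = ' ' then ([], cs)
    else
      let p := pvPartSpace cs
      (c :: p.1, p.2)

-- ===== PORT A =====
-- one iteration of A's for-loop; state = (completed_instructions, register_value, status_by_cycle)
def pvStepA (st : Int × Int × PySem.Dict Int Int) (cmd : List Char) : Int × Int × PySem.Dict Int Int :=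
  if (pvPartSpace cmd).1 = "addx".toList then
    -- completed += 2; register += int(increment); Pre_ excludes the ValueError inputs
    (st.1 + 1 + 1, st.2.1 + (PySem.Int.ofChars? (pvPartSpace cmd).2).getD 0,
     st.2.2.insert (st.1 + 1 + 1) (st.2.1 + (PySem.Int.ofChars? (pvPartSpace cmd).2).getD 0))
  else
    (st.1 + 1, st.2.1, st.2.2.insert (st.1 + 1) st.2.1)

def day_10_value_after_cycle_completions (text : String) : List (Int × Int) :=
  ((PySem.Chars.splitOn text.toList "\n".toList).foldl pvStepA
    ((0 : Int), (1 : Int), (PySem.Dict.empty : PySem.Dict Int Int))).2.2.items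

-- ===== PORT B =====
-- _parse: a command as a (cycle_cost, register_delta) pair
def pvParse (cmd : List Char) : Int × Int :=
  if (pvPartSpace cmd).1 = "addx".toList then (2, (PySem.Int.ofChars? (pvPartSpace cmd).2).getD 0)
  else (1, 0)

-- _prefix_sums: running totals, seeded at start (the Python loop appending to out)
def pvPrefixSums (xs : List Int) (start : Int) : List Int :=
  (xs.foldl (fun acc x => (acc.1 + x, acc.2 ++ [acc.1 + x])) (start, ([] : List Int))).2

def day_10_value_after_cycle_completions_alt (text : String) : List (Int × Int) :=
  let pairs := (PySem.Chars.splitOn text.toList "\n".toList).map pvParse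
  let cycles := pvPrefixSums (pairs.map (·.1)) 0
  let values := pvPrefixSums (pairs.map (·.2)) 1
  (PySem.Dict.ofList (cycles.zip values)).items

-- ===== PRECONDITION & SPEC =====
-- Pre_ excludes exactly the inputs where A raises ValueError: a line whose first space-separated
-- word is "addx" but whose remainder is not int()-parseable (including a bare "addx" line).
def Pre_day_10_value_after_cycle_completions (text : String) : Prop :=
  ∀ cmd ∈ PySem.Chars.splitOn text.toList "\n".toList,
    (pvPartSpace cmd).1 = "addx".toList → (PySem.Int.ofChars? (pvPartSpace cmd).2).isSome = true
instance (text : String) : Decidable (Pre_day_10_value_after_cycle_completions text) := by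
  unfold Pre_day_10_value_after_cycle_completions; infer_instance

def pvWitness_day_10_value_after_cycle_completions : String := "addx 3\nnoop\naddx -5"

def Spec_day_10_value_after_cycle_completions (text : String) (out : List (Int × Int)) : Prop := out = day_10_value_after_cycle_completions_alt text
instance (text : String) (out : List (Int × Int)) : Decidable (Spec_day_10_value_after_cycle_completions text out) := by unfold Spec_day_10_value_after_cycle_completions; infer_instance

-- ===== CLAIM (what is proved, stated in full; the proofs are below) =====
def Claim_equal_day_10_value_after_cycle_completions : Prop := ∀ (text : String), Dom_day_10_value_after_cycle_completions text → Pre_day_10_value_after_cycle_completions text → Spec_day_10_value_after_cycle_completions text (day_10_value_after_cycle_completions text)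

-- ===== LEMMAS AND PROOFS =====

-- recursive characterization of _prefix_sums
def pvPS : List Int → Int → List Int
  | [], _ => []
  | x :: xs, s => (s + x) :: pvPS xs (s + x)

lemma pvPrefixSums_go (xs : List Int) : ∀ (s : Int) (out : List Int),
    (xs.foldl (fun acc x => (acc.1 + x, acc.2 ++ [acc.1 + x])) (s, out)).2 = out ++ pvPS xs s := by
  induction xs with
  | nil => intro s out; simp [pvPS]
  | cons x xs ih => intro s out; simp [List.foldl, pvPS, ih]

lemma pvPrefixSums_eq (xs : List Int) (s : Int) : pvPrefixSums xs s = pvPS xs s := by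
  simp [pvPrefixSums, pvPrefixSums_go]

lemma pvPS_length (xs : List Int) : ∀ s, (pvPS xs s).length = xs.length := by
  induction xs with
  | nil => intro s; rfl
  | cons x xs ih => intro s; simp [pvPS, ih]

lemma pvPS_mem_gt (xs : List Int) (h : ∀ x ∈ xs, 1 ≤ x) :
    ∀ s, ∀ y ∈ pvPS xs s, s < y := by
  induction xs with
  | nil => intro s y hy; simp [pvPS] at hy
  | cons x xs ih =>
    intro s y hy
    simp only [pvPS, List.mem_cons] at hy
    rcases hy with rfl | hy
    · have := h x (by simp); omega
    · have := ih (fun z hz => h z (by simp [hz])) (s + x) y hy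
      have := h x (by simp); omega

lemma pvPS_pairwise (xs : List Int) (h : ∀ x ∈ xs, 1 ≤ x) :
    ∀ s, (pvPS xs s).Pairwise (· < ·) := by
  induction xs with
  | nil => intro s; simp [pvPS]
  | cons x xs ih =>
    intro s
    simp only [pvPS, List.pairwise_cons]
    exact ⟨pvPS_mem_gt xs (fun z hz => h z (by simp [hz])) (s + x),
           ih (fun z hz => h z (by simp [hz])) (s + x)⟩

lemma pvParse_fst_ge_one (cmd : List Char) : 1 ≤ (pvParse cmd).1 := by
  unfold pvParse
  by_cases h : (pvPartSpace cmd).1 = "addx".toList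
  · rw [if_pos h]; norm_num
  · rw [if_neg h]

-- B's combine step, written recursively
def pvZipPS (ps : List (Int × Int)) (c r : Int) : List (Int × Int) :=
  (pvPS (ps.map (·.1)) c).zip (pvPS (ps.map (·.2)) r)

lemma pvZipPS_nil (c r : Int) : pvZipPS [] c r = [] := by simp [pvZipPS, pvPS]

lemma pvZipPS_cons (p : Int × Int) (ps : List (Int × Int)) (c r : Int) :
    pvZipPS (p :: ps) c r = (c + p.1, r + p.2) :: pvZipPS ps (c + p.1) (r + p.2) := by
  simp [pvZipPS, pvPS]

-- a dict built from pairs with distinct keys lists exactly those pairs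
lemma pvItems_ofList (l : List (Int × Int)) (h : (l.map Prod.fst).Nodup) :
    (PySem.Dict.ofList l).items = l := by
  have := PySem.Dict.items_foldl_insert_fresh (κ := Int) (ν := Int) l Prod.fst Prod.snd
    PySem.Dict.empty (by intro a _; simp [PySem.Dict.contains_empty]) h
  simpa [PySem.Dict.ofList, PySem.Dict.update, PySem.Dict.empty] using this

-- main invariant: A's loop from (c, r, d) appends exactly B's zipped prefix sums, provided d's keys are ≤ c
lemma pvMain (cmds : List (List Char)) : ∀ (c r : Int) (d : PySem.Dict Int Int),
    (∀ k ∈ d.keys, k ≤ c) →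
    ((cmds.foldl pvStepA (c, r, d)).2.2).items = d.items ++ pvZipPS (cmds.map pvParse) c r := by
  induction cmds with
  | nil => intro c r d _; simp [pvZipPS_nil]
  | cons cmd cmds ih =>
    intro c r d hk
    have hfresh : ∀ v : Int, 1 ≤ v → d.contains (c + v) = false := by
      intro v hv
      by_contra hcon
      have : d.contains (c + v) = true := by
        cases h : d.contains (c + v) with
        | false => exact absurd h hcon
        | true => rfl
      have hmem := (PySem.Dict.contains_iff_mem_keys d (c + v)).mp this
      have := hk _ hmem; omega
    by_cases h : (pvPartSpace cmd).1 = "addx".toList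
    · -- addx branch
      have hstep : pvStepA (c, r, d) cmd =
          (c + 2, r + (PySem.Int.ofChars? (pvPartSpace cmd).2).getD 0,
           d.insert (c + 2) (r + (PySem.Int.ofChars? (pvPartSpace cmd).2).getD 0)) := by
        unfold pvStepA
        rw [if_pos h]
        norm_num [add_assoc]
      have hins := PySem.Dict.items_insert_of_not_contains d
        (k := c + 2) (r + (PySem.Int.ofChars? (pvPartSpace cmd).2).getD 0) (hfresh 2 (by norm_num))
      have hkeys : ∀ k ∈ (d.insert (c + 2) (r + (PySem.Int.ofChars? (pvPartSpace cmd).2).getD 0)).keys,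
          k ≤ c + 2 := by
        intro k hkmem
        rcases (PySem.Dict.mem_keys_insert _ _ _ _).mp hkmem with rfl | hkd
        · omega
        · have := hk _ hkd; omega
      have hparse : pvParse cmd = (2, (PySem.Int.ofChars? (pvPartSpace cmd).2).getD 0) := by
        unfold pvParse; rw [if_pos h]
      simp only [List.foldl_cons, hstep, List.map_cons, hparse, pvZipPS_cons]
      rw [ih _ _ _ hkeys, hins]
      simp
    · -- noop branch
      have hstep : pvStepA (c, r, d) cmd = (c + 1, r, d.insert (c + 1) r) := by
        unfold pvStepA; rw [if_neg h]
      have hins := PySem.Dict.items_insert_of_not_contains d (k := c + 1) r (hfresh 1 (by norm_num))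
      have hkeys : ∀ k ∈ (d.insert (c + 1) r).keys, k ≤ c + 1 := by
        intro k hkmem
        rcases (PySem.Dict.mem_keys_insert _ _ _ _).mp hkmem with rfl | hkd
        · omega
        · have := hk _ hkd; omega
      have hparse : pvParse cmd = (1, 0) := by unfold pvParse; rw [if_neg h]
      simp only [List.foldl_cons, hstep, List.map_cons, hparse, pvZipPS_cons]
      rw [ih _ _ _ hkeys, hins]
      simp

-- B's port evaluates to the zipped prefix sums (the dict round-trip is the identity: keys strictly increase)
lemma pvAlt_eq (text : String) :
    day_10_value_after_cycle_completions_alt text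
      = pvZipPS ((PySem.Chars.splitOn text.toList "\n".toList).map pvParse) 0 1 := by
  unfold day_10_value_after_cycle_completions_alt
  set pairs := (PySem.Chars.splitOn text.toList "\n".toList).map pvParse with hpairs
  have hcost : ∀ x ∈ pairs.map (·.1), (1 : Int) ≤ x := by
    intro x hx
    rw [hpairs] at hx
    simp only [List.map_map, List.mem_map] at hx
    rcases hx with ⟨cmd, _, rfl⟩
    exact pvParse_fst_ge_one cmd
  have hlen : (pvPS (pairs.map (·.1)) 0).length = (pvPS (pairs.map (·.2)) 1).length := by
    simp [pvPS_length]
  have hmapfst : ((pvPS (pairs.map (·.1)) 0).zip (pvPS (pairs.map (·.2)) 1)).map Prod.fst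
      = pvPS (pairs.map (·.1)) 0 := List.map_fst_zip (le_of_eq hlen)
  have hnodup : (((pvPS (pairs.map (·.1)) 0).zip (pvPS (pairs.map (·.2)) 1)).map Prod.fst).Nodup := by
    rw [hmapfst]
    exact ((pvPS_pairwise _ hcost 0).imp (fun hab => ne_of_lt hab))
  simp only [pvPrefixSums_eq]
  rw [pvItems_ofList _ hnodup]
  rfl

-- ===== VERDICT (by name: the statement is the Claim_ definition above) =====
theorem day_10_value_after_cycle_completions_spec : Claim_equal_day_10_value_after_cycle_completions := by
  intro text _ _
  unfold Spec_day_10_value_after_cycle_completions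
  rw [pvAlt_eq]
  unfold day_10_value_after_cycle_completions
  rw [pvMain _ 0 1 PySem.Dict.empty (by simp [PySem.Dict.keys_empty])]
  simp [PySem.Dict.empty]
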